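-- pv_equiv track=rewrite | github.com/EduLara97/Proyecto_Juego_SW2 | Main.py | seleccionarEscenario
-- ===== SOURCE A (Python) =====
-- def seleccionarEscenario(mx, my, escenario):
--     id_escenario = 0
--     for escena in escenario:
--         if 108 <= mx <= 313 and 219 <= my <= 321 and escena == "MOC":
--             id_escenario = 1
--         elif 478 <= mx <= 695 and 219 <= my <= 324 and escena == "TIA":
--             id_escenario = 3
--         elif 108 <= mx <= 313 and 397 <= my <= 505 and escena == "PAR":
--             id_escenario = 2
--         elif 478 <= mx <= 695 and 401 <= my <= 502 and escena == "WAR":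
--             id_escenario = 4
--     return id_escenario
-- ===== SOURCE B (Python) =====
-- # Table-driven arithmetic formulation: sum the ids of regions that hit AND whose name is present.
-- REGIONES = [
--     ("MOC", 1, 108, 313, 219, 321),
--     ("TIA", 3, 478, 695, 219, 324),
--     ("PAR", 2, 108, 313, 397, 505),
--     ("WAR", 4, 478, 695, 401, 502),
-- ]
--
-- def seleccionarEscenario(mx, my, escenario):
--     # Correct because the four boxes are pairwise disjoint: at most one term is nonzero.
--     presentes = set(escenario)
--     return sum(i for (n, i, x0, x1, y0, y1) in REGIONES
--                if x0 <= mx <= x1 and y0 <= my <= y1 and n in presentes)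
-- ===== Notes on version B (the rewrite author's own statement) =====
-- stated objective: alternative
-- what changed: B replaces A's per-element if/elif chain over the scene list by a data-driven arithmetic formulation: it builds a set of the scenes once, then sums the ids of the constant region table entries whose box contains the click and whose name is in the set (correct because the four boxes are pairwise disjoint, so at most one term is nonzero).
import Mathlib
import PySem

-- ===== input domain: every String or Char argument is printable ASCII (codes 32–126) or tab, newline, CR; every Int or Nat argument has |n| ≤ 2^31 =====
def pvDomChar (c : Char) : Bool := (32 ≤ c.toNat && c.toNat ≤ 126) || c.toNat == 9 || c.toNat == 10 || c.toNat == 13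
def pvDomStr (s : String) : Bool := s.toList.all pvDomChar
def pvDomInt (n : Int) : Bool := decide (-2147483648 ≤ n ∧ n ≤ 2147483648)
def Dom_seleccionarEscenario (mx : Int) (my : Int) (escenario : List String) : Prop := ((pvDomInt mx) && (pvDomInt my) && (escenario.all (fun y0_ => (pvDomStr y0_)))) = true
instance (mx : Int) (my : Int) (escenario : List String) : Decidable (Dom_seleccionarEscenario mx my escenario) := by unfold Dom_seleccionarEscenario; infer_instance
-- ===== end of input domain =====

-- B replaces the per-element if/elif chain by a data-driven sum over a constant region table plus a set membership (objective: alternative).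


-- ===== PORT A =====
def pvStepA (mx my : Int) (id_escenario : Int) (escena : String) : Int :=
  if 108 ≤ mx ∧ mx ≤ 313 ∧ 219 ≤ my ∧ my ≤ 321 ∧ escena = "MOC" then 1
  else if 478 ≤ mx ∧ mx ≤ 695 ∧ 219 ≤ my ∧ my ≤ 324 ∧ escena = "TIA" then 3
  else if 108 ≤ mx ∧ mx ≤ 313 ∧ 397 ≤ my ∧ my ≤ 505 ∧ escena = "PAR" then 2
  else if 478 ≤ mx ∧ mx ≤ 695 ∧ 401 ≤ my ∧ my ≤ 502 ∧ escena = "WAR" then 4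
  else id_escenario

def seleccionarEscenario (mx : Int) (my : Int) (escenario : List String) : Int :=
  escenario.foldl (pvStepA mx my) 0

-- ===== PORT B =====
-- the constant region table REGIONES: (name, id, x0, x1, y0, y1)
def pvRegiones : List (String × Int × Int × Int × Int × Int) :=
  [("MOC", 1, 108, 313, 219, 321),
   ("TIA", 3, 478, 695, 219, 324),
   ("PAR", 2, 108, 313, 397, 505),
   ("WAR", 4, 478, 695, 401, 502)]

def seleccionarEscenario_alt (mx : Int) (my : Int) (escenario : List String) : Int :=
  let presentes := PySem.Set.ofList escenario
  pvRegiones.foldl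
    (fun acc r =>
      match r with
      | (n, i, x0, x1, y0, y1) =>
        if x0 ≤ mx ∧ mx ≤ x1 ∧ y0 ≤ my ∧ my ≤ y1 ∧ n ∈ presentes then acc + i else acc)
    0

-- ===== PRECONDITION & SPEC =====
def Spec_seleccionarEscenario (mx : Int) (my : Int) (escenario : List String) (out : Int) : Prop := out = seleccionarEscenario_alt mx my escenario
instance (mx : Int) (my : Int) (escenario : List String) (out : Int) : Decidable (Spec_seleccionarEscenario mx my escenario out) := by unfold Spec_seleccionarEscenario; infer_instance

-- ===== CLAIM (what is proved, stated in full; the proofs are below) =====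
def Claim_equal_seleccionarEscenario : Prop := ∀ (mx : Int) (my : Int) (escenario : List String), Dom_seleccionarEscenario mx my escenario → Spec_seleccionarEscenario mx my escenario (seleccionarEscenario mx my escenario)

-- ===== LEMMAS AND PROOFS =====

-- proof-side characterisation: at most one (box, name) pair can fire for a click
def pvHit (mx my : Int) : Option (String × Int) :=
  if 108 ≤ mx ∧ mx ≤ 313 ∧ 219 ≤ my ∧ my ≤ 321 then some ("MOC", 1)
  else if 478 ≤ mx ∧ mx ≤ 695 ∧ 219 ≤ my ∧ my ≤ 324 then some ("TIA", 3)
  else if 108 ≤ mx ∧ mx ≤ 313 ∧ 397 ≤ my ∧ my ≤ 505 then some ("PAR", 2)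
  else if 478 ≤ mx ∧ mx ≤ 695 ∧ 401 ≤ my ∧ my ≤ 502 then some ("WAR", 4)
  else none

lemma pvStepA_eq (mx my : Int) (acc : Int) (e : String) :
    pvStepA mx my acc e =
      match pvHit mx my with
      | none => acc
      | some (n, i) => if e = n then i else acc := by
  unfold pvStepA pvHit
  split_ifs <;> simp_all <;> omega

lemma pvLoopA_eq (mx my : Int) (l : List String) (acc : Int) :
    l.foldl (pvStepA mx my) acc =
      match pvHit mx my with
      | none => acc
      | some (n, i) => if n ∈ l then i else acc := by
  induction l generalizing acc with
  | nil => cases h : pvHit mx my with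
    | none => simp
    | some p => cases p; simp
  | cons e t ih =>
    rw [List.foldl_cons, ih, pvStepA_eq]
    cases h : pvHit mx my with
    | none => rfl
    | some p =>
      cases p with
      | mk n i =>
        simp only [List.mem_cons]
        by_cases he : e = n
        · subst he; simp
        · by_cases hm : n ∈ t <;> simp [he, hm, Ne.symm he]

-- generic: fold of four guarded additions with pairwise-exclusive guards is a 5-way case split
lemma pvSum4 (p1 p2 p3 p4 : Prop) [Decidable p1] [Decidable p2] [Decidable p3] [Decidable p4]
    (h12 : ¬(p1 ∧ p2)) (h13 : ¬(p1 ∧ p3)) (h14 : ¬(p1 ∧ p4))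
    (h23 : ¬(p2 ∧ p3)) (h24 : ¬(p2 ∧ p4)) (h34 : ¬(p3 ∧ p4)) (v1 v2 v3 v4 : Int) :
    (if p4 then
        (if p3 then (if p2 then (if p1 then (0:Int) + v1 else 0) + v2 else (if p1 then (0:Int) + v1 else 0)) + v3
         else (if p2 then (if p1 then (0:Int) + v1 else 0) + v2 else (if p1 then (0:Int) + v1 else 0))) + v4
     else
        (if p3 then (if p2 then (if p1 then (0:Int) + v1 else 0) + v2 else (if p1 then (0:Int) + v1 else 0)) + v3
         else (if p2 then (if p1 then (0:Int) + v1 else 0) + v2 else (if p1 then (0:Int) + v1 else 0))))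
    = if p1 then v1 else if p2 then v2 else if p3 then v3 else if p4 then v4 else 0 := by
  split_ifs <;> first | omega | tauto

lemma pvAlt_eq (mx my : Int) (escenario : List String) :
    seleccionarEscenario_alt mx my escenario =
      match pvHit mx my with
      | none => 0
      | some (n, i) => if n ∈ escenario then i else 0 := by
  unfold seleccionarEscenario_alt pvRegiones
  simp only [List.foldl_cons, List.foldl_nil, PySem.Set.mem_ofList]
  rw [pvSum4 _ _ _ _ (by intro h; omega) (by intro h; omega) (by intro h; omega)
        (by intro h; omega) (by intro h; omega) (by intro h; omega)]
  unfold pvHit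
  by_cases b1 : 108 ≤ mx ∧ mx ≤ 313 ∧ 219 ≤ my ∧ my ≤ 321
  · have n2 : ¬(478 ≤ mx ∧ mx ≤ 695 ∧ 219 ≤ my ∧ my ≤ 324 ∧ "TIA" ∈ escenario) :=
      fun h => absurd h.1 (by omega)
    have n3 : ¬(108 ≤ mx ∧ mx ≤ 313 ∧ 397 ≤ my ∧ my ≤ 505 ∧ "PAR" ∈ escenario) :=
      fun h => absurd h.2.2.1 (by omega)
    have n4 : ¬(478 ≤ mx ∧ mx ≤ 695 ∧ 401 ≤ my ∧ my ≤ 502 ∧ "WAR" ∈ escenario) :=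
      fun h => absurd h.1 (by omega)
    rw [if_pos b1, if_neg n2, if_neg n3, if_neg n4]
    by_cases m : "MOC" ∈ escenario
    · rw [if_pos ⟨b1.1, b1.2.1, b1.2.2.1, b1.2.2.2, m⟩]; simp [m]
    · rw [if_neg (fun h => m h.2.2.2.2)]; simp [m]
  · by_cases b2 : 478 ≤ mx ∧ mx ≤ 695 ∧ 219 ≤ my ∧ my ≤ 324
    · have n1 : ¬(108 ≤ mx ∧ mx ≤ 313 ∧ 219 ≤ my ∧ my ≤ 321 ∧ "MOC" ∈ escenario) :=
        fun h => absurd h.2.1 (by omega)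
      have n3 : ¬(108 ≤ mx ∧ mx ≤ 313 ∧ 397 ≤ my ∧ my ≤ 505 ∧ "PAR" ∈ escenario) :=
        fun h => absurd h.2.1 (by omega)
      have n4 : ¬(478 ≤ mx ∧ mx ≤ 695 ∧ 401 ≤ my ∧ my ≤ 502 ∧ "WAR" ∈ escenario) :=
        fun h => absurd h.2.2.1 (by omega)
      rw [if_neg n1, if_neg b1, if_pos b2, if_neg n3, if_neg n4]
      by_cases m : "TIA" ∈ escenario
      · rw [if_pos ⟨b2.1, b2.2.1, b2.2.2.1, b2.2.2.2, m⟩]; simp [m]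
      · rw [if_neg (fun h => m h.2.2.2.2)]; simp [m]
    · by_cases b3 : 108 ≤ mx ∧ mx ≤ 313 ∧ 397 ≤ my ∧ my ≤ 505
      · have n1 : ¬(108 ≤ mx ∧ mx ≤ 313 ∧ 219 ≤ my ∧ my ≤ 321 ∧ "MOC" ∈ escenario) :=
          fun h => absurd h.2.2.2.1 (by omega)
        have n2 : ¬(478 ≤ mx ∧ mx ≤ 695 ∧ 219 ≤ my ∧ my ≤ 324 ∧ "TIA" ∈ escenario) :=
          fun h => absurd h.1 (by omega)
        have n4 : ¬(478 ≤ mx ∧ mx ≤ 695 ∧ 401 ≤ my ∧ my ≤ 502 ∧ "WAR" ∈ escenario) :=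
          fun h => absurd h.1 (by omega)
        rw [if_neg n1, if_neg n2, if_neg b1, if_neg b2, if_pos b3, if_neg n4]
        by_cases m : "PAR" ∈ escenario
        · rw [if_pos ⟨b3.1, b3.2.1, b3.2.2.1, b3.2.2.2, m⟩]; simp [m]
        · rw [if_neg (fun h => m h.2.2.2.2)]; simp [m]
      · by_cases b4 : 478 ≤ mx ∧ mx ≤ 695 ∧ 401 ≤ my ∧ my ≤ 502
        · have n1 : ¬(108 ≤ mx ∧ mx ≤ 313 ∧ 219 ≤ my ∧ my ≤ 321 ∧ "MOC" ∈ escenario) :=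
            fun h => absurd h.2.1 (by omega)
          have n2 : ¬(478 ≤ mx ∧ mx ≤ 695 ∧ 219 ≤ my ∧ my ≤ 324 ∧ "TIA" ∈ escenario) :=
            fun h => absurd h.2.2.2.1 (by omega)
          have n3 : ¬(108 ≤ mx ∧ mx ≤ 313 ∧ 397 ≤ my ∧ my ≤ 505 ∧ "PAR" ∈ escenario) :=
            fun h => absurd h.2.1 (by omega)
          rw [if_neg n1, if_neg n2, if_neg n3, if_neg b1, if_neg b2, if_neg b3, if_pos b4]
          by_cases m : "WAR" ∈ escenario
          · rw [if_pos ⟨b4.1, b4.2.1, b4.2.2.1, b4.2.2.2, m⟩]; simp [m]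
          · rw [if_neg (fun h => m h.2.2.2.2)]; simp [m]
        · rw [if_neg (fun h => b1 ⟨h.1, h.2.1, h.2.2.1, h.2.2.2.1⟩),
              if_neg (fun h => b2 ⟨h.1, h.2.1, h.2.2.1, h.2.2.2.1⟩),
              if_neg (fun h => b3 ⟨h.1, h.2.1, h.2.2.1, h.2.2.2.1⟩),
              if_neg (fun h => b4 ⟨h.1, h.2.1, h.2.2.1, h.2.2.2.1⟩),
              if_neg b1, if_neg b2, if_neg b3, if_neg b4]

-- ===== VERDICT (by name: the statement is the Claim_ definition above) =====
theorem seleccionarEscenario_spec : Claim_equal_seleccionarEscenario := by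
  intro mx my escenario _
  unfold Spec_seleccionarEscenario seleccionarEscenario
  rw [pvLoopA_eq, pvAlt_eq]
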